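-- pv_equiv track=rewrite | github.com/nitay12/mego_python_tests | various_queestions/summer_2021_A/summer_2021_Q_9_A.py | min_exchange_d_sum
-- ===== SOURCE A (Python) =====
-- def exchange(num):
--     if num < 10:
--         return True
--     string = str(num)
--     for i in range(len(string)-1):
--         if int(string[i]) % 2 == int(string[i + 1]) % 2:
--             return False
--     return True
--
-- def min_exchange_d_sum(arr):
--     def d_sum(num):
--         sum = 0
--         while num > 0:
--             sum += num % 10
--             num //= 10
--         return sum
--
--     min_sum = -1
--     index = -1
--     for i in range(len(arr)):
--         if exchange(arr[i]):
--             dsum = d_sum(arr[i])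
--             if dsum < min_sum or min_sum == -1:
--                 index = i
--                 min_sum = dsum
--     return index
-- ===== SOURCE B (Python) =====
-- def exchange(num):
--     if num < 10:
--         return True
--     string = str(num)
--     for i in range(len(string) - 1):
--         if int(string[i]) % 2 == int(string[i + 1]) % 2:
--             return False
--     return True
--
--
-- def min_exchange_d_sum(arr):
--     def d_sum(num):
--         return 0 if num <= 0 else num % 10 + d_sum(num // 10)
--
--     candidates = [(d_sum(x), i) for i, x in enumerate(arr) if exchange(x)]
--     return min(candidates)[1] if candidates else -1
-- ===== Notes on version B (the rewrite author's own statement) =====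
-- stated objective: simpler
-- what changed: Replaces the stateful running-minimum loop (min_sum/index registers with the -1 sentinel test) by two phases: a comprehension building (digit_sum, index) candidate tuples over enumerate, then min() with tuple ordering (empty -> -1); d_sum becomes a direct recursion instead of a while loop.
import Mathlib
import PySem

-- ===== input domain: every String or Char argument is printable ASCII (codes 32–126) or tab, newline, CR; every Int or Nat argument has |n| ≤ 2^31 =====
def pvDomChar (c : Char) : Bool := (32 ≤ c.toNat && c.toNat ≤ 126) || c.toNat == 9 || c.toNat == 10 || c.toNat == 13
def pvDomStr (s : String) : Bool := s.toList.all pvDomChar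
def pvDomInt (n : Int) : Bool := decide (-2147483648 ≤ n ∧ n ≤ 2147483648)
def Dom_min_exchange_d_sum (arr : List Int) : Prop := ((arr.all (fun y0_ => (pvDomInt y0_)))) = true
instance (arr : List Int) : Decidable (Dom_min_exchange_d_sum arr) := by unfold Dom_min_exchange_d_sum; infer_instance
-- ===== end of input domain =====

-- B replaces A's stateful running-minimum loop by candidates-comprehension + tuple min (objective: simpler).


-- ===== PORT A =====
-- exchange: shared module-level helper (textually identical in Source A and Source B).
-- loop 'for i in range(len(string)-1): if int(string[i]) % 2 == int(string[i+1]) % 2: return False'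
-- the 'none' branches (IndexError/ValueError) are unreachable: str(num) for num ≥ 10 is all digits.
def exchangeLoop (string : List Char) : List Int → Bool
  | [] => true
  | i :: rest =>
    match PySem.List.pyGet? string i, PySem.List.pyGet? string (i + 1) with
    | some c1, some c2 =>
      match PySem.Int.ofChars? [c1], PySem.Int.ofChars? [c2] with
      | some a, some b =>
        if PySem.Int.mod a 2 == PySem.Int.mod b 2 then false else exchangeLoop string rest
      | _, _ => false
    | _, _ => false

def exchange (num : Int) : Bool :=
  if num < 10 then true
  else
    let string := (PySem.Int.toStr num).toList
    exchangeLoop string (PySem.List.pyRange 0 (PySem.List.len string - 1) 1)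

-- A's inner d_sum: 'while num > 0: sum += num % 10; num //= 10'
def dsumLoopA (num sum : Int) : Int :=
  if 0 < num then dsumLoopA (PySem.Int.floordiv num 10) (sum + PySem.Int.mod num 10) else sum
termination_by num.toNat
decreasing_by
  rw [PySem.Int.floordiv_eq_ediv_of_pos (by omega)]
  omega

-- A's main loop over 'for i in range(len(arr))' with state (min_sum, index), both initially -1.
def min_exchange_d_sum (arr : List Int) : Int :=
  let r :=
    (PySem.List.pyRange 0 (PySem.List.len arr) 1).foldl
      (fun (st : Int × Int) i =>
        let x := PySem.List.pyGetD arr i 0   -- arr[i]; i is always in range here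
        if exchange x then
          let dsum := dsumLoopA x 0
          if dsum < st.1 ∨ st.1 = -1 then (dsum, i) else st
        else st)
      (-1, -1)
  r.2

-- ===== PORT B =====
-- B's d_sum: direct recursion 'return 0 if num <= 0 else num % 10 + d_sum(num // 10)'
def dsumB (num : Int) : Int :=
  if num ≤ 0 then 0 else PySem.Int.mod num 10 + dsumB (PySem.Int.floordiv num 10)
termination_by num.toNat
decreasing_by
  rw [PySem.Int.floordiv_eq_ediv_of_pos (by omega)]
  omega

-- candidates = [(d_sum(x), i) for i, x in enumerate(arr) if exchange(x)]; min(candidates)[1] if candidates else -1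
def min_exchange_d_sum_alt (arr : List Int) : Int :=
  let candidates :=
    ((PySem.List.enumerate arr).filter (fun p => exchange p.2)).map (fun p => (dsumB p.2, p.1))
  match PySem.List.min2? candidates (fun c => c.1) (fun c => c.2) with
  | some m => m.2
  | none => -1

-- ===== PRECONDITION & SPEC =====
def Spec_min_exchange_d_sum (arr : List Int) (out : Int) : Prop := out = min_exchange_d_sum_alt arr
instance (arr : List Int) (out : Int) : Decidable (Spec_min_exchange_d_sum arr out) := by unfold Spec_min_exchange_d_sum; infer_instance

-- ===== CLAIM (what is proved, stated in full; the proofs are below) =====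
def Claim_equal_min_exchange_d_sum : Prop := ∀ (arr : List Int), Dom_min_exchange_d_sum arr → Spec_min_exchange_d_sum arr (min_exchange_d_sum arr)

-- ===== LEMMAS AND PROOFS =====

theorem dsumB_nonneg (num : Int) : 0 ≤ dsumB num := by
  induction num using dsumB.induct with
  | case1 n h => rw [dsumB, if_pos h]
  | case2 n h ih =>
    rw [dsumB, if_neg h]
    have := PySem.Int.mod_nonneg n (b := 10) (by omega)
    omega

theorem dsumLoopA_eq (num sum : Int) : dsumLoopA num sum = sum + dsumB num := by
  induction num, sum using dsumLoopA.induct with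
  | case1 n s h ih =>
    rw [dsumLoopA, if_pos h, ih]
    conv_rhs => rw [dsumB]
    rw [if_neg (by omega)]
    omega
  | case2 n s h =>
    rw [dsumLoopA, if_neg h, dsumB, if_pos (by omega)]
    omega

-- A's loop step, on enumerate pairs (index, value), with A's d_sum already rewritten to dsumB.
def stepA (st : Int × Int) (p : Int × Int) : Int × Int :=
  if exchange p.2 then
    if dsumB p.2 < st.1 ∨ st.1 = -1 then (dsumB p.2, p.1) else st
  else st

-- the foldl body of PySem.List.min2? with keys .1 then .2
def stepM (acc : Option (Int × Int)) (c : Int × Int) : Option (Int × Int) :=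
  match acc with
  | none => some c
  | some m =>
    if (decide (c.1 < m.1) || (!decide (m.1 < c.1) && decide (c.2 < m.2))) then some c else some m

def reprSt (acc : Option (Int × Int)) : Int × Int := acc.getD (-1, -1)

def okAcc (acc : Option (Int × Int)) (s : Int) : Prop :=
  match acc with
  | none => True
  | some m => 0 ≤ m.1 ∧ m.2 < s

theorem loop_invariant (xs : List Int) :
    ∀ (s : Int) (acc : Option (Int × Int)), okAcc acc s →
      (PySem.List.enumerate xs s).foldl stepA (reprSt acc) =
        reprSt (((PySem.List.enumerate xs s).filter (fun p => exchange p.2)).foldl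
          (fun a p => stepM a (dsumB p.2, p.1)) acc) := by
  induction xs with
  | nil => intro s acc _; simp [PySem.List.enumerate]
  | cons x xs ih =>
    intro s acc hok
    rw [PySem.List.enumerate_cons]
    by_cases hx : exchange x = true
    · simp only [List.foldl_cons, List.filter_cons, hx, if_pos]
      cases acc with
      | none =>
        have : stepA (reprSt none) (s, x) = (dsumB x, s) := by
          simp [stepA, reprSt, hx]
        rw [this]
        have : stepM none (dsumB x, s) = some (dsumB x, s) := rfl
        rw [this]
        have h1 : reprSt (some (dsumB x, s)) = (dsumB x, s) := rfl
        rw [← h1]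
        exact ih (s + 1) (some (dsumB x, s)) ⟨dsumB_nonneg x, by omega⟩
      | some m =>
        obtain ⟨hm1, hm2⟩ := hok
        by_cases hlt : dsumB x < m.1
        · have hA : stepA (reprSt (some m)) (s, x) = (dsumB x, s) := by
            simp [stepA, reprSt, hx, hlt]
          have hM : stepM (some m) (dsumB x, s) = some (dsumB x, s) := by
            simp only [stepM]
            rw [if_pos (by simp [hlt])]
          rw [hA, hM]
          have h1 : reprSt (some (dsumB x, s)) = (dsumB x, s) := rfl
          rw [← h1]
          exact ih (s + 1) (some (dsumB x, s)) ⟨dsumB_nonneg x, by omega⟩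
        · have hA : stepA (reprSt (some m)) (s, x) = reprSt (some m) := by
            simp only [stepA, reprSt, Option.getD_some, if_pos hx]
            rw [if_neg (by omega)]
          have hM : stepM (some m) (dsumB x, s) = some m := by
            simp only [stepM]
            rw [if_neg (by simp only [Bool.or_eq_true, Bool.and_eq_true, Bool.not_eq_true',
              decide_eq_true_eq, decide_eq_false_iff_not]; omega)]
          rw [hA, hM]
          exact ih (s + 1) (some m) ⟨hm1, by omega⟩
    · simp only [List.foldl_cons, List.filter_cons, hx]
      have hA : stepA (reprSt acc) (s, x) = reprSt acc := by
        simp [stepA, hx]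
      rw [if_neg (by simp), hA]
      exact ih (s + 1) acc (by cases acc with
        | none => trivial
        | some m => exact ⟨hok.1, by have := hok.2; omega⟩)

theorem min2?_eq_foldl_stepM (cs : List (Int × Int)) :
    PySem.List.min2? cs (fun c => c.1) (fun c => c.2) =
      cs.foldl (fun a c => stepM a c) none := by
  unfold PySem.List.min2?
  congr 1
  funext acc c
  cases acc <;> rfl

-- ===== VERDICT (by name: the statement is the Claim_ definition above) =====
theorem min_exchange_d_sum_spec : Claim_equal_min_exchange_d_sum := by
  intro arr _
  unfold Spec_min_exchange_d_sum min_exchange_d_sum min_exchange_d_sum_alt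
  dsimp only
  have hstep :
      (fun (st : Int × Int) (i : Int) =>
        let x := PySem.List.pyGetD arr i 0
        if exchange x then
          let dsum := dsumLoopA x 0
          if dsum < st.1 ∨ st.1 = -1 then (dsum, i) else st
        else st)
      = fun st i => stepA st (i, PySem.List.pyGetD arr i 0) := by
    funext st i
    simp only [stepA, dsumLoopA_eq, zero_add]
  rw [hstep]
  rw [show (PySem.List.pyRange 0 (PySem.List.len arr) 1) = (PySem.List.pyRange 0 (PySem.List.len arr)) from rfl]
  rw [← List.foldl_map (f := fun j => ((j : Int), PySem.List.pyGetD arr j 0)) (g := stepA),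
      ← PySem.List.enumerate_eq_map_pyRange arr 0]
  have h0 : ((-1 : Int), (-1 : Int)) = reprSt none := rfl
  rw [h0, loop_invariant arr 0 none trivial]
  rw [min2?_eq_foldl_stepM]
  rw [← List.foldl_map (f := fun p : Int × Int => (dsumB p.2, p.1)) (g := fun a c => stepM a c)]
  cases hm : (((PySem.List.enumerate arr).filter fun p => exchange p.2).map
      (fun p => (dsumB p.2, p.1))).foldl (fun a c => stepM a c) none with
  | none => simp [reprSt]
  | some m => simp [reprSt]
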